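-- pv_equiv track=rewrite | github.com/HHousen/willihaveasnowday | app/views/noaa_api.py | translate_daily_weather_type_lists
-- ===== SOURCE A (Python) =====
-- def translate_daily_weather_type_lists(days):
--     average_weather_type_translator = {"fog": "WT01", "ice_fog": "WT01", "freezing_fog": "WT01", "thunderstorms": "WT03", "ice_pellets": "WT05", "haze": "WT08", "smoke": "WT08", "drizzle": "WT13", "rain": "WT16", "rain_showers": "WT16", "freezing_drizzle": "WT16", "freezing_rain": "WT16", "snow": "WT18", "snow_showers": "WT18", "ice_crystals": "WT18", "blowing_snow": "WT18"}
--     average_weather_types = {"WT01": [], "WT03": [], "WT05": [], "WT08": [], "WT13": [], "WT16": [], "WT18": []}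
--
--     for daily_values_list in days:
--         weather_types_found = []
--         for x in daily_values_list:
--             if x in average_weather_type_translator:
--                 to_append_key = average_weather_type_translator[x]
--                 weather_types_found.append(to_append_key)
--
--         # Remove duplicates
--         weather_types_found = set(weather_types_found)
--
--         for weather_type in weather_types_found:
--             average_weather_types[weather_type].append(1)
--         not_found_weather_types = [x for x in average_weather_types if x not in weather_types_found]
--         for weather_type in not_found_weather_types:
--             average_weather_types[weather_type].append(0)
--
--     return average_weather_types
-- ===== SOURCE B (Python) =====
-- def translate_daily_weather_type_lists(days):
--     translator = {"fog": "WT01", "ice_fog": "WT01", "freezing_fog": "WT01", "thunderstorms": "WT03", "ice_pellets": "WT05", "haze": "WT08", "smoke": "WT08", "drizzle": "WT13", "rain": "WT16", "rain_showers": "WT16", "freezing_drizzle": "WT16", "freezing_rain": "WT16", "snow": "WT18", "snow_showers": "WT18", "ice_crystals": "WT18", "blowing_snow": "WT18"}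
--     codes = ["WT01", "WT03", "WT05", "WT08", "WT13", "WT16", "WT18"]
--     # bitmask encoding: each weather name maps to a single bit (the position of its code)
--     bit_of = {name: 1 << codes.index(code) for name, code in translator.items()}
--     masks = []
--     for day in days:
--         m = 0
--         for x in day:
--             m |= bit_of.get(x, 0)
--         masks.append(m)
--     return {code: [(m >> i) & 1 for m in masks] for i, code in enumerate(codes)}
-- ===== Notes on version B (the rewrite author's own statement) =====
-- stated objective: alternative
-- what changed: B switches data structure: each day is compressed into a single 7-bit integer mask (one bit per code, OR-accumulated over the day's items), and each code's flag list is then read off by shifting and masking bits, instead of A's per-day set construction and mutable dict of lists with 1/0 appends.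
import Mathlib
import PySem

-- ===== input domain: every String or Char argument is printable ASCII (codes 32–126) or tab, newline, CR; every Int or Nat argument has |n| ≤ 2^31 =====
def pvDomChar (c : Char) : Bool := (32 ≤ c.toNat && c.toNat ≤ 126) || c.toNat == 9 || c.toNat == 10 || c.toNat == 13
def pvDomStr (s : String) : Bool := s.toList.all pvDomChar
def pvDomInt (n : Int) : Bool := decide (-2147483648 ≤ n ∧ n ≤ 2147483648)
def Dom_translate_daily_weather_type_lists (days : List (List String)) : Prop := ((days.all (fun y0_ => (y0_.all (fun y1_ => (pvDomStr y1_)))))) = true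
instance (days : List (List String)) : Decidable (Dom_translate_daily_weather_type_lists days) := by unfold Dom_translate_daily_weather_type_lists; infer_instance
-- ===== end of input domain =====

-- B encodes each day as a 7-bit integer mask (one bit per code) and reads each code's flag column off by bit extraction, instead of A's per-day set plus mutable dict of 1/0 appends; same cost, different data structure.

-- ===== PORT A =====
def pvTranslatorA : PySem.Dict String String := PySem.Dict.ofList
  [("fog","WT01"), ("ice_fog","WT01"), ("freezing_fog","WT01"), ("thunderstorms","WT03"),
   ("ice_pellets","WT05"), ("haze","WT08"), ("smoke","WT08"), ("drizzle","WT13"),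
   ("rain","WT16"), ("rain_showers","WT16"), ("freezing_drizzle","WT16"), ("freezing_rain","WT16"),
   ("snow","WT18"), ("snow_showers","WT18"), ("ice_crystals","WT18"), ("blowing_snow","WT18")]

-- A's per-day step: append the found codes, dedup into a set, append 1 to found keys, 0 to the rest.
-- The iteration over the set `foundSet` is order-independent (each pass touches a distinct dict key),
-- so folding in first-insertion order is exact.  `modify _ []` never takes its default: every modified
-- key is already a key of the dict (translator values / dict keys), matching Python's d[k].append(v).
def pvStepA (avg : PySem.Dict String (List Int)) (day : List String) : PySem.Dict String (List Int) :=
  let found := day.foldl (fun acc x =>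
    if pvTranslatorA.contains x then acc ++ [pvTranslatorA.getD x ""] else acc) []
  let foundSet : PySem.Set String := PySem.Set.ofList found
  let avg1 := foundSet.foldl (fun d wt => d.modify wt [] (· ++ [(1 : Int)])) avg
  let notFound := avg1.keys.filter (fun k => !(PySem.Set.contains foundSet k))
  notFound.foldl (fun d wt => d.modify wt [] (· ++ [(0 : Int)])) avg1

def translate_daily_weather_type_lists (days : List (List String)) : List (String × List Int) :=
  let init : PySem.Dict String (List Int) := PySem.Dict.ofList
    [("WT01",[]), ("WT03",[]), ("WT05",[]), ("WT08",[]), ("WT13",[]), ("WT16",[]), ("WT18",[])]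
  (days.foldl pvStepA init).items

-- ===== PORT B =====
def pvTranslatorB : PySem.Dict String String := PySem.Dict.ofList
  [("fog","WT01"), ("ice_fog","WT01"), ("freezing_fog","WT01"), ("thunderstorms","WT03"),
   ("ice_pellets","WT05"), ("haze","WT08"), ("smoke","WT08"), ("drizzle","WT13"),
   ("rain","WT16"), ("rain_showers","WT16"), ("freezing_drizzle","WT16"), ("freezing_rain","WT16"),
   ("snow","WT18"), ("snow_showers","WT18"), ("ice_crystals","WT18"), ("blowing_snow","WT18")]

def pvCodes : List String := ["WT01", "WT03", "WT05", "WT08", "WT13", "WT16", "WT18"]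

-- bit_of = {name: 1 << codes.index(code) for name, code in translator.items()}
-- (masks stay non-negative and < 2^7, so Nat carries Python's int exactly here)
def pvBitOf : PySem.Dict String Nat :=
  PySem.Dict.ofList (pvTranslatorB.items.map (fun p => (p.1, 1 <<< pvCodes.idxOf p.2)))

def translate_daily_weather_type_lists_alt (days : List (List String)) : List (String × List Int) :=
  let masks : List Nat := days.foldl (fun acc day =>
    acc ++ [day.foldl (fun m x => m ||| pvBitOf.getD x 0) 0]) []
  (PySem.List.enumerate pvCodes).map (fun p =>
    (p.2, masks.map (fun m => (((m >>> p.1.toNat) &&& 1 : Nat) : Int))))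

-- ===== PRECONDITION & SPEC =====
def Spec_translate_daily_weather_type_lists (days : List (List String)) (out : List (String × List Int)) : Prop := out = translate_daily_weather_type_lists_alt days
instance (days : List (List String)) (out : List (String × List Int)) : Decidable (Spec_translate_daily_weather_type_lists days out) := by unfold Spec_translate_daily_weather_type_lists; infer_instance

-- ===== CLAIM (what is proved, stated in full; the proofs are below) =====
def Claim_equal_translate_daily_weather_type_lists : Prop := ∀ (days : List (List String)), Dom_translate_daily_weather_type_lists days → Spec_translate_daily_weather_type_lists days (translate_daily_weather_type_lists days)

-- ===== LEMMAS AND PROOFS =====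

-- the per-day flag on A's side: 1 iff some item of the day translates to c
def pvFlag (c : String) (day : List String) : Int :=
  if PySem.Set.contains (PySem.Set.ofList (day.filterMap (fun x => pvTranslatorB.get? x))) c then 1 else 0

lemma pvVals : ∀ p ∈ pvTranslatorA.items, p.2 ∈ pvCodes := by decide

lemma pvVal_mem {x c : String} (h : pvTranslatorA.get? x = some c) : c ∈ pvCodes :=
  pvVals _ (PySem.Dict.mem_items_of_get?_eq_some _ h)

-- A's found-list is the filterMap of the translator lookups
lemma pvFound_eq (day : List String) (acc : List String) :
    day.foldl (fun acc x =>
      if pvTranslatorA.contains x then acc ++ [pvTranslatorA.getD x ""] else acc) acc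
      = acc ++ day.filterMap (fun x => pvTranslatorB.get? x) := by
  rw [PySem.List.foldl_append_if]
  congr 1
  have hT : pvTranslatorB = pvTranslatorA := rfl
  rw [hT]
  induction day with
  | nil => simp
  | cons x day ih =>
      simp only [List.filter_cons, List.filterMap_cons]
      rw [PySem.Dict.contains_eq_isSome_get?]
      cases hx : pvTranslatorA.get? x with
      | none => simpa [hx] using ih
      | some v =>
          simp only [hx, Option.isSome_some, if_pos, List.map_cons,
            PySem.Dict.getD_eq_get?_getD]
          simpa [hx] using ih

-- a modify-append loop over keys already in the dict leaves the key list unchanged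
lemma pvKeysFold (S : List String) (v : Int) (d : PySem.Dict String (List Int))
    (h : ∀ k ∈ S, k ∈ d.keys) :
    (S.foldl (fun d wt => d.modify wt [] (· ++ [v])) d).keys = d.keys := by
  rw [PySem.Dict.keys_foldl_modify S [] (fun _ _ => (· ++ [v])) d,
      PySem.Set.update_eq_append_filter]
  have hfil : List.filter (fun y => !PySem.Set.contains d.keys y) (PySem.Set.ofList S) = [] := by
    refine List.filter_eq_nil_iff.mpr (fun b hb => ?_)
    have hbk : b ∈ d.keys := h b ((PySem.Set.mem_ofList S b).mp hb)
    simpa using hbk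
  rw [hfil, List.append_nil]

lemma pvFilterBeq (S : List String) (hnd : S.Nodup) (c : String) :
    S.filter (fun k => k == c) = if c ∈ S then [c] else [] := by
  induction S with
  | nil => simp
  | cons a S ih =>
      rcases List.nodup_cons.mp hnd with ⟨ha, hS⟩
      by_cases hac : a = c
      · subst hac
        have : List.filter (fun k => k == a) S = [] :=
          List.filter_eq_nil_iff.mpr (fun b hb => by simp; rintro rfl; exact ha hb)
        simp [this]
      · have : c ∈ a :: S ↔ c ∈ S := by simp [Ne.symm hac]
        simp only [List.filter_cons, this, ih hS]
        simp [hac]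

-- a modify-append loop over a duplicate-free key list appends v exactly to its members
lemma pvGetDFold (S : List String) (hnd : S.Nodup) (d : PySem.Dict String (List Int))
    (v : Int) (c : String) :
    (S.foldl (fun d wt => d.modify wt [] (· ++ [v])) d).getD c []
      = d.getD c [] ++ if c ∈ S then [v] else [] := by
  have h := PySem.Dict.getD_foldl_modify_append (S.map (fun k => (k, v))) d c
  rw [List.foldl_map] at h
  simp only [List.filter_map, Function.comp_def] at h
  rw [h, pvFilterBeq S hnd c]
  by_cases hc : c ∈ S <;> simp [hc]

lemma pvCodes_nodup : pvCodes.Nodup := by decide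

-- A's per-day step on a dict of shape (codes, g) appends each code's flag
lemma pvStepA_eq (g : String → List Int) (day : List String) :
    pvStepA (PySem.Dict.mk (pvCodes.map (fun c => (c, g c)))) day
      = PySem.Dict.mk (pvCodes.map (fun c => (c, g c ++ [pvFlag c day]))) := by
  simp only [pvStepA]
  rw [pvFound_eq day [], List.nil_append]
  set S : PySem.Set String :=
    PySem.Set.ofList (day.filterMap (fun x => pvTranslatorB.get? x)) with hSdef
  set D0 : PySem.Dict String (List Int) :=
    PySem.Dict.mk (pvCodes.map (fun c => (c, g c))) with hD0def
  have hnodupS : S.Nodup := PySem.Set.nodup_ofList _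
  have hsubS : ∀ k ∈ S, k ∈ pvCodes := by
    intro k hk
    obtain ⟨x, -, hx⟩ := List.mem_filterMap.mp ((PySem.Set.mem_ofList _ k).mp hk)
    exact pvVal_mem hx
  have hkeys0 : D0.keys = pvCodes := by
    rw [hD0def]; simp [PySem.Dict.keys, Function.comp_def]
  set avg1 := S.foldl (fun d wt => d.modify wt [] (· ++ [(1 : Int)])) D0 with havg1
  have hkeys1 : avg1.keys = pvCodes := by
    rw [havg1, pvKeysFold S 1 D0 (by rw [hkeys0]; exact hsubS), hkeys0]
  rw [hkeys1]
  set notFound := pvCodes.filter (fun k => !(PySem.Set.contains S k)) with hNFdef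
  have hnodupNF : notFound.Nodup := pvCodes_nodup.filter _
  have hmemNF : ∀ c, c ∈ notFound ↔ c ∈ pvCodes ∧ ¬ c ∈ S := by
    intro c
    rw [hNFdef, List.mem_filter]
    simp
  set F := notFound.foldl (fun d wt => d.modify wt [] (· ++ [(0 : Int)])) avg1 with hFdef
  have hkeysF : F.keys = pvCodes := by
    rw [hFdef, pvKeysFold notFound 0 avg1
      (fun k hk => by rw [hkeys1]; exact (List.mem_filter.mp hk).1), hkeys1]
  apply PySem.Dict.ext
  rw [PySem.Dict.items_eq_map_keys F (by rw [hkeysF]; exact pvCodes_nodup) [], hkeysF]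
  show _ = pvCodes.map (fun c => (c, g c ++ [pvFlag c day]))
  refine List.map_congr_left fun c hc => ?_
  have hgetD0 : D0.getD c [] = g c :=
    PySem.Dict.getD_of_mem_items (d := D0) (List.mem_map_of_mem hc)
      (hkeys0 ▸ pvCodes_nodup) []
  have hflag : pvFlag c day = if c ∈ S then 1 else 0 := by
    by_cases h : c ∈ S
    · simp [pvFlag, ← hSdef, h]
    · simp [pvFlag, ← hSdef, h]
  rw [hFdef, pvGetDFold notFound hnodupNF avg1 0 c, havg1, pvGetDFold S hnodupS D0 1 c, hgetD0]
  by_cases h : c ∈ S <;> simp [hflag, hmemNF, h, hc]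

lemma pvFoldA_eq (days : List (List String)) (g : String → List Int) :
    days.foldl pvStepA (PySem.Dict.mk (pvCodes.map (fun c => (c, g c))))
      = PySem.Dict.mk (pvCodes.map (fun c => (c, g c ++ days.map (pvFlag c)))) := by
  induction days generalizing g with
  | nil => simp
  | cons d ds ih =>
      simp only [List.foldl_cons, pvStepA_eq, ih, List.map_cons]
      refine congrArg _ (List.map_congr_left fun c _ => ?_)
      simp

-- ==== B-side lemmas: bit extraction equals the flag ====

-- get? through a value-mapped literal dict
lemma pvGet?_mk_mapVal (f : String → Nat) (l : List (String × String)) (x : String) :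
    (PySem.Dict.mk (l.map (fun p => (p.1, f p.2)))).get? x = ((PySem.Dict.mk l).get? x).map f := by
  induction l with
  | nil => simp [PySem.Dict.get?]
  | cons p l ih =>
      obtain ⟨k, v⟩ := p
      by_cases h : k = x <;> simp [PySem.Dict.get?_mk_cons, h, ih]

-- bit_of looks up the translator and shifts by the code's position
lemma pvBitOf_get? (x : String) :
    pvBitOf.get? x = (pvTranslatorB.get? x).map (fun c => 1 <<< pvCodes.idxOf c) := by
  have h1 : pvBitOf
      = PySem.Dict.mk (pvTranslatorB.items.map (fun p => (p.1, 1 <<< pvCodes.idxOf p.2))) := by rfl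
  rw [h1]
  exact pvGet?_mk_mapVal (fun c => 1 <<< pvCodes.idxOf c) pvTranslatorB.items x

lemma pvExtract_testBit (m : Nat) (i : Nat) :
    ((m >>> i) &&& 1 : Nat) = if m.testBit i then 1 else 0 := by
  rw [Nat.and_one_is_mod]
  simp only [Nat.testBit, Nat.one_and_eq_mod_two, bne_iff_ne, ne_eq]
  rcases Nat.mod_two_eq_zero_or_one (m >>> i) with h | h <;> simp [h]

lemma pvMask_testBit (day : List String) (m0 : Nat) (i : Nat) :
    (day.foldl (fun m x => m ||| pvBitOf.getD x 0) m0).testBit i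
      = (m0.testBit i || day.any (fun x => (pvBitOf.getD x 0).testBit i)) := by
  induction day generalizing m0 with
  | nil => simp
  | cons x day ih =>
      simp only [List.foldl_cons, List.any_cons, ih, Nat.testBit_or]
      cases m0.testBit i <;> cases (pvBitOf.getD x 0).testBit i <;> simp

lemma pvBit_testBit (x : String) (i : Nat) (code : String)
    (hidx : pvCodes.idxOf code = i) :
    (pvBitOf.getD x 0).testBit i = (pvTranslatorB.get? x == some code) := by
  rw [PySem.Dict.getD_eq_get?_getD, pvBitOf_get?]
  cases hx : pvTranslatorB.get? x with
  | none => simp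
  | some c =>
      have hc : c ∈ pvCodes := pvVal_mem hx
      simp only [Option.map_some, Option.getD_some, Nat.one_shiftLeft,
        Nat.testBit_two_pow]
      rw [show (some c == some code) = (c == code) by simp]
      by_cases hcc : c = code
      · simp [hcc, hidx]
      · have : pvCodes.idxOf c ≠ i := by
          rw [← hidx]
          intro h
          exact hcc ((List.idxOf_inj hc).mp h)
        simp [this, hcc]

-- each bit of B's day mask is A's flag for the code sitting at that position
lemma pvColumn_day (i : Nat) (code : String)
    (hidx : pvCodes.idxOf code = i) (day : List String) :
    ((((day.foldl (fun m x => m ||| pvBitOf.getD x 0) 0) >>> i) &&& 1 : Nat) : Int)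
      = pvFlag code day := by
  rw [pvExtract_testBit, pvMask_testBit]
  rw [show (fun x => (pvBitOf.getD x 0).testBit i)
        = (fun x => pvTranslatorB.get? x == some code)
      from funext fun x => pvBit_testBit x i code hidx]
  have hflag : pvFlag code day
      = if code ∈ day.filterMap (fun x => pvTranslatorB.get? x) then 1 else 0 := by
    by_cases h : code ∈ day.filterMap (fun x => pvTranslatorB.get? x) <;>
      simp [pvFlag, h]
  rw [hflag]
  have hiff : (day.any (fun x => pvTranslatorB.get? x == some code)) = true
      ↔ code ∈ day.filterMap (fun x => pvTranslatorB.get? x) := by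
    rw [List.any_eq_true, List.mem_filterMap]
    constructor
    · rintro ⟨x, hx, hbe⟩
      exact ⟨x, hx, by simpa using hbe⟩
    · rintro ⟨x, hx, hbe⟩
      exact ⟨x, hx, by simp [hbe]⟩
  by_cases h : code ∈ day.filterMap (fun x => pvTranslatorB.get? x)
  · simp [hiff.mpr h, h]
  · have hfalse : (day.any (fun x => pvTranslatorB.get? x == some code)) = false := by
      cases hb : day.any (fun x => pvTranslatorB.get? x == some code)
      · rfl
      · exact absurd (hiff.mp hb) h
    simp [hfalse, h]

-- whole columns: A's flag list for a code = B's bit-extracted list over the day masks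
lemma pvCol (i : Nat) (code : String)
    (hidx : pvCodes.idxOf code = i) (days : List (List String)) :
    days.map (pvFlag code)
      = (days.map (fun day => day.foldl (fun m x => m ||| pvBitOf.getD x 0) 0)).map
          (fun m => (((m >>> i) &&& 1 : Nat) : Int)) := by
  rw [List.map_map]
  exact List.map_congr_left fun day _ => (pvColumn_day i code hidx day).symm

-- ===== VERDICT (by name: the statement is the Claim_ definition above) =====
theorem translate_daily_weather_type_lists_spec : Claim_equal_translate_daily_weather_type_lists := by
  intro days _
  show _ = _
  simp only [translate_daily_weather_type_lists, translate_daily_weather_type_lists_alt]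
  have h0 : PySem.Dict.ofList
      [("WT01",([] : List Int)), ("WT03",[]), ("WT05",[]), ("WT08",[]), ("WT13",[]), ("WT16",[]), ("WT18",[])]
      = PySem.Dict.mk (pvCodes.map (fun c => (c, (fun _ => ([] : List Int)) c))) := by rfl
  simp only [h0, pvFoldA_eq]
  rw [PySem.List.foldl_append_singleton_eq_map]
  have henum : PySem.List.enumerate pvCodes
      = [((0:Int),"WT01"),(1,"WT03"),(2,"WT05"),(3,"WT08"),(4,"WT13"),(5,"WT16"),(6,"WT18")] := by rfl
  rw [henum]
  show pvCodes.map _ = _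
  simp only [pvCodes, List.map_cons, List.map_nil, List.nil_append]
  refine congrArg₂ _ ?_ (congrArg₂ _ ?_ (congrArg₂ _ ?_ (congrArg₂ _ ?_
    (congrArg₂ _ ?_ (congrArg₂ _ ?_ (congrArg₂ _ ?_ rfl))))))
  · exact congrArg _ (pvCol ((0:Int).toNat) "WT01" (by decide) days)
  · exact congrArg _ (pvCol ((1:Int).toNat) "WT03" (by decide) days)
  · exact congrArg _ (pvCol ((2:Int).toNat) "WT05" (by decide) days)
  · exact congrArg _ (pvCol ((3:Int).toNat) "WT08" (by decide) days)
  · exact congrArg _ (pvCol ((4:Int).toNat) "WT13" (by decide) days)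
  · exact congrArg _ (pvCol ((5:Int).toNat) "WT16" (by decide) days)
  · exact congrArg _ (pvCol ((6:Int).toNat) "WT18" (by decide) days)
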